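-- pv_equiv track=rewrite | github.com/heisenberg183/samsung-pro | Test5Q2.py | find_optimal_D_optimized
-- ===== SOURCE A (Python) =====
-- from bisect import bisect_right
--
-- def find_optimal_D_optimized(a, b):
--     # Sort the input arrays to enable binary search.
--     a.sort()
--     b.sort()
--     n, m = len(a), len(b)
--
--     # Candidate threshold values: only check values present in a or b.
--     candidates = sorted(set(a + b))
--
--     best_diff = float('-inf')
--     best_D = None
--
--     for D in candidates:
--         # Use binary search to count elements <= D.
--         count_a = bisect_right(a, D)
--         count_b = bisect_right(b, D)
--
--         # Compute scores for a and b: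
--         # For each array, score = (# elements > D)*2 + (# elements <= D)*1.
--         # This simplifies to: score = 2*(total elements) - (# elements <= D).
--         score_a = 2 * n - count_a
--         score_b = 2 * m - count_b
--
--         diff = score_a - score_b
--
--         if diff > best_diff:
--             best_diff = diff
--             best_D = D
--
--     return best_D, best_diff
-- ===== SOURCE B (Python) =====
-- def find_optimal_D_optimized(a, b):
--     # Sorts a and b in place, like the original.
--     a.sort()
--     b.sort()
--     n, m = len(a), len(b)
--     best_diff = float('-inf')
--     best_D = None
--     i = j = 0
--     # Sweep candidates ascending with two running pointers instead of bisecting.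
--     for D in sorted(set(a + b)):
--         while i < n and a[i] <= D:
--             i += 1
--         while j < m and b[j] <= D:
--             j += 1
--         # i = # elements of a <= D, so score_a = 2*n - i; same for b.
--         diff = (2 * n - i) - (2 * m - j)
--         if best_D is None or diff > best_diff:
--             best_D, best_diff = D, diff
--     return best_D, best_diff
-- ===== Notes on version B (the rewrite author's own statement) =====
-- stated objective: alternative
-- what changed: Replaces the per-candidate bisect_right binary searches with a single ascending two-pointer sweep that maintains the still-unconsumed suffixes of the sorted arrays, counting elements > D directly.
-- outside the precondition, e.g. on find_optimal_D_optimized([], []): A returns (None, -inf), B returns (None, -inf)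
import Mathlib
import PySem

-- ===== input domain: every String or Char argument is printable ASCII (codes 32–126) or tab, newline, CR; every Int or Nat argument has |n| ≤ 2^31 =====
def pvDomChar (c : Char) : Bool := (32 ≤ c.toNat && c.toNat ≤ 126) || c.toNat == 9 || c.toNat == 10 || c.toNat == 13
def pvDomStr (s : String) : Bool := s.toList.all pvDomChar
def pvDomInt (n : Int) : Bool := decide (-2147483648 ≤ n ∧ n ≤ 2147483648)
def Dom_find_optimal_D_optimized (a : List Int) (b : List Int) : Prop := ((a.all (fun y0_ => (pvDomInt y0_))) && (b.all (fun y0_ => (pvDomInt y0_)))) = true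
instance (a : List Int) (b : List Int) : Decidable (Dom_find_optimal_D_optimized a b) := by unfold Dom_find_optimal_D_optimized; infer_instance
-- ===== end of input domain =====

-- B replaces A's per-candidate bisect_right binary searches with one ascending two-pointer
-- sweep over the sorted arrays (alternative decomposition, similar cost).
-- Both A and B sort the argument lists in place in Python; the equivalence proved here is
-- about the RETURN value (the ports are pure).

-- ===== PORT A =====
-- shared update of (best_D, best_diff); None encodes Python's initial (None, float('-inf'))
def pvBestStep (best : Option (Int × Int)) (D : Int) (diff : Int) : Option (Int × Int) :=
  match best with
  | none => some (D, diff)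
  | some (bD, bdiff) => if bdiff < diff then some (D, diff) else some (bD, bdiff)

def find_optimal_D_optimized (a : List Int) (b : List Int) : Int × Int :=
  let as := PySem.List.sorted a (fun x => x)
  let bs := PySem.List.sorted b (fun x => x)
  let n : Int := as.length
  let m : Int := bs.length
  let candidates := PySem.List.sorted (PySem.Set.ofList (as ++ bs)) (fun x => x)
  let r := candidates.foldl (fun best D =>
    let count_a : Int := PySem.List.bisectRight as D
    let count_b : Int := PySem.List.bisectRight bs D
    let score_a := 2 * n - count_a
    let score_b := 2 * m - count_b
    pvBestStep best D (score_a - score_b)) none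
  match r with
  | some p => p
  | none => (0, 0)   -- unreachable under Pre_ (candidates nonempty)

-- ===== PORT B =====
-- while i < len(xs) and xs[i] <= D: i += 1
def pvAdvance (xs : List Int) (D : Int) (i : Nat) : Nat :=
  if h : i < xs.length then
    if xs[i] ≤ D then pvAdvance xs D (i + 1) else i
  else i
  termination_by xs.length - i

def find_optimal_D_optimized_alt (a : List Int) (b : List Int) : Int × Int :=
  let as := PySem.List.sorted a (fun x => x)
  let bs := PySem.List.sorted b (fun x => x)
  let n : Int := as.length
  let m : Int := bs.length
  let candidates := PySem.List.sorted (PySem.Set.ofList (as ++ bs)) (fun x => x)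
  let st := candidates.foldl (fun (st : Nat × Nat × Option (Int × Int)) D =>
    let i := pvAdvance as D st.1
    let j := pvAdvance bs D st.2.1
    let diff := (2 * n - (i : Int)) - (2 * m - (j : Int))
    (i, j, pvBestStep st.2.2 D diff)) (0, 0, none)
  match st.2.2 with
  | some p => p
  | none => (0, 0)

-- ===== PRECONDITION & SPEC =====
-- Pre_ excludes only a = b = []: there Python A returns (None, float('-inf')), not a pair of ints.
def Pre_find_optimal_D_optimized (a : List Int) (b : List Int) : Prop := a ≠ [] ∨ b ≠ []
instance (a : List Int) (b : List Int) : Decidable (Pre_find_optimal_D_optimized a b) := by unfold Pre_find_optimal_D_optimized; infer_instance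
def pvWitness_find_optimal_D_optimized : List Int × List Int := ([1, 3], [2])

def Spec_find_optimal_D_optimized (a : List Int) (b : List Int) (out : Int × Int) : Prop := out = find_optimal_D_optimized_alt a b
instance (a : List Int) (b : List Int) (out : Int × Int) : Decidable (Spec_find_optimal_D_optimized a b out) := by unfold Spec_find_optimal_D_optimized; infer_instance

-- ===== CLAIM (what is proved, stated in full; the proofs are below) =====
def Claim_equal_find_optimal_D_optimized : Prop := ∀ (a : List Int) (b : List Int), Dom_find_optimal_D_optimized a b → Pre_find_optimal_D_optimized a b → Spec_find_optimal_D_optimized a b (find_optimal_D_optimized a b)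

-- ===== LEMMAS AND PROOFS =====

-- dropWhile of a dropWhile with a weaker predicate collapses
lemma dropWhile_dropWhile_of_imp {α : Type} (p q : α → Bool) (xs : List α)
    (h : ∀ x, q x = true → p x = true) :
    (xs.dropWhile q).dropWhile p = xs.dropWhile p := by
  induction xs with
  | nil => rfl
  | cons x t ih =>
    by_cases hq : q x = true
    · simp [hq, h x hq, ih]
    · simp [List.dropWhile_cons, hq]

-- a prefix-characterised dropWhile is a drop
lemma dropWhile_eq_drop_of_spec {α : Type} (p : α → Bool) (xs : List α) (k : Nat)
    (hk : k ≤ xs.length)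
    (hpre : ∀ j (hj : j < xs.length), j < k → p xs[j] = true)
    (hpost : ∀ (hlt : k < xs.length), p xs[k] = false) :
    xs.dropWhile p = xs.drop k := by
  induction xs generalizing k with
  | nil => simp
  | cons x t ih =>
    cases k with
    | zero =>
      have := hpost (by simp)
      simp only [List.getElem_cons_zero] at this
      simp [this]
    | succ k' =>
      have hx : p x = true := hpre 0 (by simp) (by omega)
      simp only [List.dropWhile_cons, hx, if_true, List.drop_succ_cons]
      exact ih k' (by simpa using hk)
        (fun j hj hjk => hpre (j+1) (by simpa using hj) (by omega))
        (fun hlt => by simpa using hpost (by simpa using hlt))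

-- the pointer after the while loop marks exactly the (≤ D)-dropWhile suffix of xs.drop i
lemma drop_pvAdvance (xs : List Int) (D : Int) :
    ∀ i, i ≤ xs.length →
      xs.drop (pvAdvance xs D i) = (xs.drop i).dropWhile (fun y => decide (y ≤ D)) := by
  intro i
  induction i using pvAdvance.induct xs D with
  | case1 i h hle ih =>
    intro _
    rw [pvAdvance]
    simp only [dif_pos h, if_pos hle]
    rw [ih (by omega), List.drop_eq_getElem_cons h, List.dropWhile_cons]
    simp [hle]
  | case2 i h hgt =>
    intro _
    rw [pvAdvance]
    simp only [dif_pos h, if_neg hgt]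
    rw [List.drop_eq_getElem_cons h, List.dropWhile_cons]
    simp [hgt]
  | case3 i h =>
    intro hle
    have hi : i = xs.length := by omega
    rw [pvAdvance]
    simp [hi, List.drop_length]

lemma pvAdvance_le (xs : List Int) (D : Int) :
    ∀ i, i ≤ xs.length → pvAdvance xs D i ≤ xs.length := by
  intro i
  induction i using pvAdvance.induct xs D with
  | case1 i h hle ih => intro _; rw [pvAdvance]; simp only [dif_pos h, if_pos hle]; exact ih (by omega)
  | case2 i h hgt => intro _; rw [pvAdvance]; simp only [dif_pos h, if_neg hgt]; omega
  | case3 i h => intro hi; rw [pvAdvance]; simp only [dif_neg h]; omega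

lemma pvAdvance_eq (xs : List Int) (D : Int) (i : Nat) (hle : i ≤ xs.length) :
    (pvAdvance xs D i : Int) =
      (xs.length : Int) - (((xs.drop i).dropWhile (fun y => decide (y ≤ D))).length : Int) := by
  have h1 := drop_pvAdvance xs D i hle
  have h2 := pvAdvance_le xs D i hle
  have h3 : xs.length - pvAdvance xs D i = ((xs.drop i).dropWhile (fun y => decide (y ≤ D))).length := by
    rw [← h1, List.length_drop]
  omega

-- bisectRight on a sorted list counts the complement of the (≤ D)-dropWhile suffix
lemma bisect_eq_sub_dropWhile (xs : List Int) (D : Int)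
    (hs : xs.Pairwise (fun x y => x ≤ y)) :
    (PySem.List.bisectRight xs D : Int) =
      (xs.length : Int) - ((xs.dropWhile (fun y => decide (y ≤ D))).length : Int) := by
  obtain ⟨hle, hpre, hpost⟩ := PySem.List.bisectRight_spec xs D hs
  have hdw : xs.dropWhile (fun y => decide (y ≤ D)) = xs.drop (PySem.List.bisectRight xs D) := by
    apply dropWhile_eq_drop_of_spec _ _ _ hle
    · intro j hj hjk; simpa using hpre j hj hjk
    · intro hlt; simpa using not_le.mpr (hpost _ hlt (le_refl _))
  rw [hdw, List.length_drop]
  omega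

-- the two folds stay in lock step
lemma fold_lockstep (as bs : List Int)
    (has : as.Pairwise (fun x y => x ≤ y)) (hbs : bs.Pairwise (fun x y => x ≤ y)) :
    ∀ (cs : List Int), cs.Pairwise (fun x y => x ≤ y) →
    ∀ (i j : Nat) (best : Option (Int × Int)), i ≤ as.length → j ≤ bs.length →
    (∀ D ∈ cs, (as.drop i).dropWhile (fun y => decide (y ≤ D)) = as.dropWhile (fun y => decide (y ≤ D))) →
    (∀ D ∈ cs, (bs.drop j).dropWhile (fun y => decide (y ≤ D)) = bs.dropWhile (fun y => decide (y ≤ D))) →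
    (cs.foldl (fun (st : Nat × Nat × Option (Int × Int)) D =>
        let i' := pvAdvance as D st.1
        let j' := pvAdvance bs D st.2.1
        let diff := (2 * (as.length : Int) - (i' : Int)) - (2 * (bs.length : Int) - (j' : Int))
        (i', j', pvBestStep st.2.2 D diff)) (i, j, best)).2.2 =
    cs.foldl (fun best D =>
        pvBestStep best D ((2 * (as.length : Int) - (PySem.List.bisectRight as D : Int)) -
                           (2 * (bs.length : Int) - (PySem.List.bisectRight bs D : Int)))) best := by
  intro cs
  induction cs with
  | nil => intro _ i j best _ _ _ _; rfl
  | cons D cs' ih =>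
    intro hp i j best hi hj hra hrb
    rw [List.pairwise_cons] at hp
    obtain ⟨hD, hp'⟩ := hp
    simp only [List.foldl_cons]
    have hiD : (pvAdvance as D i : Int) = PySem.List.bisectRight as D := by
      rw [pvAdvance_eq as D i hi, hra D (by simp), bisect_eq_sub_dropWhile as D has]
    have hjD : (pvAdvance bs D j : Int) = PySem.List.bisectRight bs D := by
      rw [pvAdvance_eq bs D j hj, hrb D (by simp), bisect_eq_sub_dropWhile bs D hbs]
    have hi' : pvAdvance as D i ≤ as.length := by
      have := pvAdvance_eq as D i hi
      have hd : ((as.drop i).dropWhile (fun y => decide (y ≤ D))).length ≤ as.length := by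
        calc ((as.drop i).dropWhile (fun y => decide (y ≤ D))).length
            ≤ (as.drop i).length := List.length_dropWhile_le _ _
          _ ≤ as.length := by simp
      omega
    have hj' : pvAdvance bs D j ≤ bs.length := by
      have := pvAdvance_eq bs D j hj
      have hd : ((bs.drop j).dropWhile (fun y => decide (y ≤ D))).length ≤ bs.length := by
        calc ((bs.drop j).dropWhile (fun y => decide (y ≤ D))).length
            ≤ (bs.drop j).length := List.length_dropWhile_le _ _
          _ ≤ bs.length := by simp
      omega
    simp only [hiD, hjD]
    apply ih hp' _ _ _ hi' hj'
    · intro D' hD'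
      rw [drop_pvAdvance as D i hi, hra D (by simp), dropWhile_dropWhile_of_imp]
      intro x hx
      have : x ≤ D := by simpa using hx
      simp; exact le_trans this (hD D' hD')
    · intro D' hD'
      rw [drop_pvAdvance bs D j hj, hrb D (by simp), dropWhile_dropWhile_of_imp]
      intro x hx
      have : x ≤ D := by simpa using hx
      simp; exact le_trans this (hD D' hD')

-- ===== VERDICT (by name: the statement is the Claim_ definition above) =====
theorem find_optimal_D_optimized_spec : Claim_equal_find_optimal_D_optimized := by
  intro a b _ _
  unfold Spec_find_optimal_D_optimized find_optimal_D_optimized find_optimal_D_optimized_alt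
  simp only
  rw [fold_lockstep (PySem.List.sorted a (fun x => x)) (PySem.List.sorted b (fun x => x))
        (PySem.List.sorted_pairwise a (fun x => x)) (PySem.List.sorted_pairwise b (fun x => x))
        _ ((PySem.List.sorted_ofList_pairwise_lt _).imp (fun h => le_of_lt h))
        0 0 none (by omega) (by omega) (fun _ _ => rfl) (fun _ _ => rfl)]
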